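-- pv_equiv track=rewrite | github.com/Abenezer-Mengistu/My-project2 | python-src/app.py | _dedupe_venues
-- ===== SOURCE A (Python) =====
-- def _dedupe_venues(rows: list[dict]) -> list[dict]:
--     by_name = {}
--     for row in rows:
--         name = (row.get("name") or "").strip().lower()
--         if not name:
--             continue
--         existing = by_name.get(name)
--         if not existing:
--             by_name[name] = row
--             continue
--         existing_url = str(existing.get("stubhub_url") or "")
--         row_url = str(row.get("stubhub_url") or "")
--         # Prefer canonical venue pages over event pages when both exist.
--         if "/venue/" in row_url and "/venue/" not in existing_url:
--             by_name[name] = row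
--     return list(by_name.values())
-- ===== SOURCE B (Python) =====
-- def _dedupe_venues(rows: list[dict]) -> list[dict]:
--     # Group rows by normalized name (first-appearance order), then pick
--     # per group the first row with a canonical '/venue/' URL, else the first row.
--     groups = {}
--     for row in rows:
--         name = (row.get("name") or "").strip().lower()
--         if not name:
--             continue
--         groups.setdefault(name, []).append(row)
--     return [
--         next((r for r in group if "/venue/" in str(r.get("stubhub_url") or "")), group[0])
--         for group in groups.values()
--     ]
-- ===== Notes on version B (the rewrite author's own statement) =====
-- stated objective: alternative
-- what changed: Replaces A's incremental best-so-far dict update (conditionally overwriting the stored row when a '/venue/' URL arrives) with a group-by pass collecting all rows per normalized name followed by a per-group selection of the first '/venue/' row, else the group's first row.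
import Mathlib
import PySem

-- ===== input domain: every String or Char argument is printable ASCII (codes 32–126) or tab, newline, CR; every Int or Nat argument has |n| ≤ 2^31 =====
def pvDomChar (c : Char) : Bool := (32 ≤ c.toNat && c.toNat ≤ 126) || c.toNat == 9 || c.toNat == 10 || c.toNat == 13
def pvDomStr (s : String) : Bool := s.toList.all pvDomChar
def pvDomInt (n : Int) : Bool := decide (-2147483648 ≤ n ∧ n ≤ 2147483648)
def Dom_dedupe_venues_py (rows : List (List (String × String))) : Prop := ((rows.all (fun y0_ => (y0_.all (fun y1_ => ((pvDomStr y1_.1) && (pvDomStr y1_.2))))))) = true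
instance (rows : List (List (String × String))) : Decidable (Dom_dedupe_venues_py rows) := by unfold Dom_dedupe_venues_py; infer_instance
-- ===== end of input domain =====

-- B replaces A's incremental best-so-far dict by a group-by pass followed by a
-- per-group selection (first '/venue/' row, else the group's first row); objective: alternative decomposition.

-- ===== PORT A =====
-- name = (row.get("name") or "").strip().lower()   ('or ""' = default "", exact since "" or "" == "")
def pvAName (row : List (String × String)) : String :=
  PySem.Str.lower (PySem.Str.strip (PySem.Dict.getD (PySem.Dict.mk row) "name" ""))

def pvAStep (by_name : PySem.Dict String (List (String × String)))
    (row : List (String × String)) : PySem.Dict String (List (String × String)) :=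
  let name := pvAName row
  if name == "" then by_name
  else
    match PySem.Dict.get? by_name name with
    | none => by_name.insert name row                     -- existing is None: falsy
    | some existing =>
      if existing.isEmpty then by_name.insert name row    -- existing == {}: falsy
      else
        -- str(… or "") on string values = getD … ""
        let existing_url := PySem.Dict.getD (PySem.Dict.mk existing) "stubhub_url" ""
        let row_url := PySem.Dict.getD (PySem.Dict.mk row) "stubhub_url" ""
        if PySem.Str.isIn "/venue/" row_url && !(PySem.Str.isIn "/venue/" existing_url) then
          by_name.insert name row
        else by_name

def dedupe_venues_py (rows : List (List (String × String))) : List (List (String × String)) :=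
  (rows.foldl pvAStep PySem.Dict.empty).values

-- ===== PORT B =====
def pvBName (row : List (String × String)) : String :=
  PySem.Str.lower (PySem.Str.strip (PySem.Dict.getD (PySem.Dict.mk row) "name" ""))

def pvBIsVenue (row : List (String × String)) : Bool :=
  PySem.Str.isIn "/venue/" (PySem.Dict.getD (PySem.Dict.mk row) "stubhub_url" "")

-- groups.setdefault(name, []).append(row)
def pvBStep (groups : PySem.Dict String (List (List (String × String))))
    (row : List (String × String)) : PySem.Dict String (List (List (String × String))) :=
  let name := pvBName row
  if name == "" then groups
  else PySem.Dict.modify groups name [] (fun lst => lst ++ [row])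

-- next((r for r in group if …), group[0])
def pvBSelect (group : List (List (String × String))) : List (String × String) :=
  match group.find? pvBIsVenue with
  | some r => r
  | none => group.headD []

def dedupe_venues_py_alt (rows : List (List (String × String))) : List (List (String × String)) :=
  ((rows.foldl pvBStep PySem.Dict.empty).values).map pvBSelect

-- ===== PRECONDITION & SPEC =====
def Spec_dedupe_venues_py (rows : List (List (String × String))) (out : List (List (String × String))) : Prop := out = dedupe_venues_py_alt rows
instance (rows : List (List (String × String))) (out : List (List (String × String))) : Decidable (Spec_dedupe_venues_py rows out) := by unfold Spec_dedupe_venues_py; infer_instance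

-- ===== CLAIM (what is proved, stated in full; the proofs are below) =====
def Claim_equal_dedupe_venues_py : Prop := ∀ (rows : List (List (String × String))), Dom_dedupe_venues_py rows → Spec_dedupe_venues_py rows (dedupe_venues_py rows)

-- ===== LEMMAS AND PROOFS =====

-- Invariant relating A's best-so-far dict to B's group dict.
def pvInv (dA : PySem.Dict String (List (String × String)))
    (dB : PySem.Dict String (List (List (String × String)))) : Prop :=
  dB.keys.Nodup ∧ dA.keys = dB.keys ∧
  ∀ k g, dB.get? k = some g →
    (∀ r ∈ g, pvAName r = k) ∧ g ≠ [] ∧ dA.get? k = some (pvBSelect g)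

theorem pvBSelect_mem {g : List (List (String × String))} (h : g ≠ []) : pvBSelect g ∈ g := by
  unfold pvBSelect
  cases hf : g.find? pvBIsVenue with
  | some r => exact List.mem_of_find?_eq_some hf
  | none =>
    cases g with
    | nil => exact absurd rfl h
    | cons a t => simp [List.headD]

theorem pvAName_nil : pvAName [] = "" := by decide

theorem pvBSelect_singleton (row : List (String × String)) : pvBSelect [row] = row := by
  unfold pvBSelect
  cases h : pvBIsVenue row <;> simp [List.find?, h, List.headD]

theorem pvBSelect_append (g : List (List (String × String))) (row : List (String × String))
    (hg : g ≠ []) :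
    pvBSelect (g ++ [row]) =
      if pvBIsVenue row && !(pvBIsVenue (pvBSelect g)) then row else pvBSelect g := by
  unfold pvBSelect
  cases hf : g.find? pvBIsVenue with
  | some r =>
    have hv : pvBIsVenue r = true := List.find?_some hf
    rw [List.find?_append, hf]
    simp [hv]
  | none =>
    rw [List.find?_append, hf]
    simp only [Option.none_or]
    cases g with
    | nil => exact absurd rfl hg
    | cons a t =>
      have hva : pvBIsVenue a = false := by
        have := List.find?_eq_none.mp hf a (by simp)
        simpa using this
      simp only [List.headD, hva]
      cases hrow : pvBIsVenue row with
      | true => simp [hrow]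
      | false => simp [hrow]

theorem pvInv_step (dA : PySem.Dict String (List (String × String)))
    (dB : PySem.Dict String (List (List (String × String))))
    (row : List (String × String)) (h : pvInv dA dB) :
    pvInv (pvAStep dA row) (pvBStep dB row) := by
  obtain ⟨hnd, hkeys, hrel⟩ := h
  by_cases hempty : pvAName row = ""
  · -- skipped row: both dicts unchanged
    have eA : pvAStep dA row = dA := by
      unfold pvAStep; simp [hempty]
    have eB : pvBStep dB row = dB := by
      unfold pvBStep; simp [show pvBName row = "" from hempty]
    rw [eA, eB]; exact ⟨hnd, hkeys, hrel⟩
  · have hbeA : (pvAName row == "") = false := beq_eq_false_iff_ne.mpr hempty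
    have hbeB : (pvBName row == "") = false := hbeA
    cases hget : PySem.Dict.get? dB (pvAName row) with
    | none =>
      -- new key: A stores row, B starts group [row]
      have hgetA : PySem.Dict.get? dA (pvAName row) = none := by
        rw [PySem.Dict.get?_eq_none_iff_not_mem_keys] at hget ⊢
        rwa [hkeys]
      have hcB : dB.contains (pvAName row) = false := by
        rw [PySem.Dict.contains_eq_isSome_get?, hget]; rfl
      have hcA : dA.contains (pvAName row) = false := by
        rw [PySem.Dict.contains_eq_isSome_get?, hgetA]; rfl
      have eA : pvAStep dA row = dA.insert (pvAName row) row := by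
        unfold pvAStep
        simp only [hbeA, Bool.false_eq_true, if_false, hgetA]
      have eB : pvBStep dB row = dB.insert (pvAName row) [row] := by
        unfold pvBStep
        simp only [hbeB, Bool.false_eq_true, if_false]
        show dB.insert (pvAName row) (dB.getD (pvAName row) [] ++ [row]) = _
        rw [PySem.Dict.getD_of_get?_eq_none dB [] hget]
        rfl
      rw [eA, eB]
      refine ⟨PySem.Dict.nodup_keys_insert dB _ [row] hnd, ?_, ?_⟩
      · rw [PySem.Dict.keys_insert_of_not_contains dA row hcA,
            PySem.Dict.keys_insert_of_not_contains dB [row] hcB, hkeys]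
      · intro k g hkg
        by_cases hk : k = pvAName row
        · subst hk
          rw [PySem.Dict.get?_insert_self] at hkg
          cases hkg
          refine ⟨?_, by simp, ?_⟩
          · intro r hr; rw [List.mem_singleton.mp hr]
          · rw [PySem.Dict.get?_insert_self, pvBSelect_singleton]
        · rw [PySem.Dict.get?_insert_of_ne dB [row] hk] at hkg
          rw [PySem.Dict.get?_insert_of_ne dA row hk]
          exact hrel k g hkg
    | some g =>
      obtain ⟨hall, hne, hgetA⟩ := hrel (pvAName row) g hget
      have hsel_mem : pvBSelect g ∈ g := pvBSelect_mem hne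
      have hsel_name : pvAName (pvBSelect g) = pvAName row := hall _ hsel_mem
      have hsel_ne : pvBSelect g ≠ [] := by
        intro hnil
        rw [hnil, pvAName_nil] at hsel_name
        exact hempty hsel_name.symm
      have hsel_isEmpty : (pvBSelect g).isEmpty = false := by
        cases hsg : pvBSelect g with
        | nil => exact absurd hsg hsel_ne
        | cons a t => rfl
      have hcB : dB.contains (pvAName row) = true := by
        rw [PySem.Dict.contains_eq_isSome_get?, hget]; rfl
      have hcA : dA.contains (pvAName row) = true := by
        rw [PySem.Dict.contains_eq_isSome_get?, hgetA]; rfl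
      have hndA : dA.keys.Nodup := hkeys ▸ hnd
      -- A keeps its current best: inserting the same value back changes nothing
      have hins_self : dA.insert (pvAName row) (pvBSelect g) = dA := by
        apply PySem.Dict.ext
        rw [PySem.Dict.items_insert_of_contains dA (pvBSelect g) hcA]
        apply List.ext_getElem (by simp)
        intro i h1 h2
        simp only [List.getElem_map]
        by_cases hi : (dA.items[i]'h2).1 = pvAName row
        · have hmem : dA.items[i]'h2 ∈ dA.items := List.getElem_mem _
          have hgv : dA.get? (pvAName row) = some (dA.items[i]'h2).2 := by
            apply PySem.Dict.get?_of_mem_items _ _ hndA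
            rw [← hi]; exact hmem
          rw [hgetA] at hgv
          have h2v : pvBSelect g = (dA.items[i]'h2).2 := Option.some.inj hgv
          have : (dA.items[i]'h2) = (pvAName row, pvBSelect g) := Prod.ext hi h2v.symm
          simp [this]
        · simp [hi]
      have eA : pvAStep dA row = dA.insert (pvAName row) (pvBSelect (g ++ [row])) := by
        unfold pvAStep
        simp only [hbeA, Bool.false_eq_true, if_false, hgetA, hsel_isEmpty]
        rw [pvBSelect_append g row hne]
        show (if pvBIsVenue row && !(pvBIsVenue (pvBSelect g)) then _ else _) = _
        cases hc : pvBIsVenue row && !(pvBIsVenue (pvBSelect g)) with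
        | true => simp
        | false => simp only [Bool.false_eq_true, if_false]; rw [hins_self]
      have eB : pvBStep dB row = dB.insert (pvAName row) (g ++ [row]) := by
        unfold pvBStep
        simp only [hbeB, Bool.false_eq_true, if_false]
        show dB.insert (pvAName row) (dB.getD (pvAName row) [] ++ [row]) = _
        rw [PySem.Dict.getD_eq_get?_getD, hget]
        rfl
      rw [eA, eB]
      refine ⟨PySem.Dict.nodup_keys_insert dB _ _ hnd, ?_, ?_⟩
      · rw [PySem.Dict.keys_insert_of_contains dA _ hcA,
            PySem.Dict.keys_insert_of_contains dB _ hcB, hkeys]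
      · intro k g' hkg'
        by_cases hk : k = pvAName row
        · subst hk
          rw [PySem.Dict.get?_insert_self] at hkg'
          cases hkg'
          refine ⟨?_, by simp, by rw [PySem.Dict.get?_insert_self]⟩
          intro r hr
          rcases List.mem_append.mp hr with hr | hr
          · exact hall r hr
          · rw [List.mem_singleton.mp hr]
        · rw [PySem.Dict.get?_insert_of_ne dB _ hk] at hkg'
          rw [PySem.Dict.get?_insert_of_ne dA _ hk]
          exact hrel k g' hkg'

theorem pvInv_foldl (rows : List (List (String × String)))
    (dA : PySem.Dict String (List (String × String)))
    (dB : PySem.Dict String (List (List (String × String)))) (h : pvInv dA dB) :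
    pvInv (rows.foldl pvAStep dA) (rows.foldl pvBStep dB) := by
  induction rows generalizing dA dB with
  | nil => exact h
  | cons row rest ih =>
    simp only [List.foldl_cons]
    exact ih _ _ (pvInv_step dA dB row h)

theorem pvInv_empty : pvInv PySem.Dict.empty PySem.Dict.empty := by
  refine ⟨by simp, rfl, ?_⟩
  intro k g hkg
  rw [PySem.Dict.get?_empty] at hkg
  exact absurd hkg (by simp)

-- ===== VERDICT (by name: the statement is the Claim_ definition above) =====
theorem dedupe_venues_py_spec : Claim_equal_dedupe_venues_py := by
  intro rows _
  unfold Spec_dedupe_venues_py dedupe_venues_py dedupe_venues_py_alt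
  obtain ⟨hnd, hkeys, hrel⟩ := pvInv_foldl rows PySem.Dict.empty PySem.Dict.empty pvInv_empty
  set dA := rows.foldl pvAStep PySem.Dict.empty with hdA
  set dB := rows.foldl pvBStep PySem.Dict.empty with hdB
  have hndA : dA.keys.Nodup := hkeys ▸ hnd
  rw [PySem.Dict.values_eq_map_keys dA hndA [], PySem.Dict.values_eq_map_keys dB hnd []]
  rw [hkeys, List.map_map]
  apply List.map_congr_left
  intro k hk
  have hc : dB.contains k = true := (PySem.Dict.contains_iff_mem_keys dB k).mpr hk
  rw [PySem.Dict.contains_eq_isSome_get?] at hc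
  cases hget : dB.get? k with
  | none => rw [hget] at hc; exact absurd hc (by simp)
  | some g =>
    obtain ⟨_, _, hgetA⟩ := hrel k g hget
    simp [PySem.Dict.getD_eq_get?_getD, hgetA, hget]
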